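-- pv_equiv track=rewrite | github.com/zhusq20/reasoning-evals | simple-evals/sc.py | even_distribute_resources
-- ===== SOURCE A (Python) =====
-- def even_distribute_resources(M: int, N: int) -> list[int]:
--     if N <= 0 or M < 0:
--         assert False, "Can not assign"
--
--     base = M // N  #
--     extra = M % N  # extra resources
--
--     distribution = []
--     for i in range(N):
--         if i < extra:
--             distribution.append(base + 1)
--         else:
--             distribution.append(base)
--
--     return distribution
-- ===== SOURCE B (Python) =====
-- def even_distribute_resources(M: int, N: int) -> list[int]:
--     if N <= 0 or M < 0:
--         assert False, "Can not assign"
--     distribution = []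
--     rem = M
--     for k in range(N, 0, -1):
--         give = -(-rem // k)  # ceil(rem / k): give this slot its fair share of what remains
--         distribution.append(give)
--         rem -= give
--     return distribution
-- ===== Notes on version B (the rewrite author's own statement) =====
-- stated objective: alternative
-- what changed: Replaces the precomputed base=M//N, extra=M%N with an assignment-free-of-modulus greedy loop: each slot receives the ceiling of (remaining resources)/(remaining slots), and the remainder is carried forward; no per-index comparison against extra is ever made.
import Mathlib
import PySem

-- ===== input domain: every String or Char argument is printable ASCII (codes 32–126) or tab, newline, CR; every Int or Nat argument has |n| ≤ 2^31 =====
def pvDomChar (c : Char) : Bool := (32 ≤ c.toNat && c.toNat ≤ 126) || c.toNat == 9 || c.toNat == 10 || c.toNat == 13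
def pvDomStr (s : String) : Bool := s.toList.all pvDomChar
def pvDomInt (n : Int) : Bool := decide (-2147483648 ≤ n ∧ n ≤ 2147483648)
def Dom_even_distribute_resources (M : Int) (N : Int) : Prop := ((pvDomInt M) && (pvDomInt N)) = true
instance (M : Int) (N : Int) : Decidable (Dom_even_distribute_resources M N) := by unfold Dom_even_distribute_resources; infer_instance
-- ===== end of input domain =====

-- B replaces A's precomputed base/extra plus per-index branch by a greedy remainder-passing
-- loop: each slot gets ceil(remaining / slots_left) (objective: alternative).

-- ===== PORT A =====
-- literal port: base = M // N, extra = M % N, then a loop over range(N) appending base+1 or base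
def even_distribute_resources (M : Int) (N : Int) : List Int :=
  let base := PySem.Int.floordiv M N
  let extra := PySem.Int.mod M N
  (PySem.List.pyRange 0 N 1).foldl
    (fun distribution i => distribution ++ [if i < extra then base + 1 else base]) []

-- ===== PORT B =====
-- literal port of Source B's loop 'for k in range(N, 0, -1)': recursion on the count of
-- remaining slots k; give = -(-rem // k) is Python's ceiling division, rem -= give.
def evenAltLoop (rem : Int) (k : Nat) : List Int :=
  match k with
  | 0 => []
  | k' + 1 =>
    let give := -(PySem.Int.floordiv (-rem) ((k' : Int) + 1))
    give :: evenAltLoop (rem - give) k'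

def even_distribute_resources_alt (M : Int) (N : Int) : List Int :=
  evenAltLoop M N.toNat

-- ===== PRECONDITION & SPEC =====
-- Pre_ excludes exactly the inputs (N ≤ 0 or M < 0) on which A raises AssertionError.
def Pre_even_distribute_resources (M : Int) (N : Int) : Prop := 0 < N ∧ 0 ≤ M
instance (M : Int) (N : Int) : Decidable (Pre_even_distribute_resources M N) := by
  unfold Pre_even_distribute_resources; infer_instance
def pvWitness_even_distribute_resources : Int × Int := (7, 3)

def Spec_even_distribute_resources (M : Int) (N : Int) (out : List Int) : Prop := out = even_distribute_resources_alt M N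
instance (M : Int) (N : Int) (out : List Int) : Decidable (Spec_even_distribute_resources M N out) := by unfold Spec_even_distribute_resources; infer_instance

-- ===== CLAIM (what is proved, stated in full; the proofs are below) =====
def Claim_equal_even_distribute_resources : Prop := ∀ (M : Int) (N : Int), Dom_even_distribute_resources M N → Pre_even_distribute_resources M N → Spec_even_distribute_resources M N (even_distribute_resources M N)

-- ===== LEMMAS AND PROOFS =====

theorem map_pyRange_const {α : Type} (a b : Int) (c : α) :
    (PySem.List.pyRange a b 1).map (fun _ => c) = List.replicate (b - a).toNat c := by
  rw [PySem.List.pyRange_one, List.map_map]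
  have : ((fun _ => c) ∘ fun k : Nat => a + (k : Int)) = fun _ => c := rfl
  rw [this, List.map_const', List.length_range]

-- A's output in closed form: extra copies of base+1 then N-extra copies of base.
theorem evenA_eq_replicate (M N : Int) (hN : 0 < N) :
    even_distribute_resources M N =
      List.replicate (PySem.Int.mod M N).toNat (PySem.Int.floordiv M N + 1) ++
      List.replicate (N - PySem.Int.mod M N).toNat (PySem.Int.floordiv M N) := by
  unfold even_distribute_resources
  set base := PySem.Int.floordiv M N with hbase
  set extra := PySem.Int.mod M N with hextra
  have hNe : N ≠ 0 := by omega
  have hex : 0 ≤ extra ∧ extra < N := by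
    rw [hextra, PySem.Int.mod_eq_emod_of_pos hN]
    exact ⟨Int.emod_nonneg M hNe, Int.emod_lt_of_pos M hN⟩
  rw [PySem.List.foldl_append_singleton_eq_map, List.nil_append,
      PySem.List.pyRange_one_append 0 extra N (by omega) (by omega), List.map_append]
  have h1 : (PySem.List.pyRange 0 extra 1).map (fun i => if i < extra then base + 1 else base)
      = List.replicate extra.toNat (base + 1) := by
    rw [List.map_congr_left (g := fun _ => base + 1), map_pyRange_const]
    · norm_num
    · intro i hi
      rw [PySem.List.mem_pyRange_one] at hi
      simp [hi.2]
  have h2 : (PySem.List.pyRange extra N 1).map (fun i => if i < extra then base + 1 else base)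
      = List.replicate (N - extra).toNat base := by
    rw [List.map_congr_left (g := fun _ => base), map_pyRange_const]
    intro i hi
    rw [PySem.List.mem_pyRange_one] at hi
    simp [not_lt.mpr hi.1]
  rw [h1, h2]

-- B's greedy loop on an exactly divisible remainder yields k copies of b.
theorem evenAltLoop_const (b : Int) : ∀ k : Nat, evenAltLoop (b * k) k = List.replicate k b := by
  intro k
  induction k with
  | zero => rfl
  | succ k' ih =>
    unfold evenAltLoop
    have hg : -(PySem.Int.floordiv (-(b * ((k' : Int) + 1))) ((k' : Int) + 1)) = b := by
      rw [PySem.Int.neg_floordiv_neg_eq_iff_of_pos (by positivity)]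
      constructor <;> nlinarith [Int.natCast_nonneg k']
    push_cast
    simp only [hg]
    have : b * ((k' : Int) + 1) - b = b * (k' : Int) := by ring
    rw [this, ih]
    rfl

-- B's greedy loop with remainder b*k+e, 0 ≤ e < k, yields e copies of b+1 then k-e copies of b.
theorem evenAltLoop_main : ∀ (k : Nat) (b e : Int), 0 ≤ e → e < k →
    evenAltLoop (b * k + e) k =
      List.replicate e.toNat (b + 1) ++ List.replicate (k - e.toNat) b := by
  intro k
  induction k with
  | zero => intro b e h0 h1; omega
  | succ k' ih =>
    intro b e h0 h1
    by_cases he : e = 0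
    · subst he
      simp only [Int.toNat_zero, List.replicate_zero, List.nil_append, Nat.sub_zero, add_zero]
      exact evenAltLoop_const b (k' + 1)
    · have he0 : 0 < e := lt_of_le_of_ne h0 (Ne.symm he)
      have hek : e ≤ (k' : Int) := by exact_mod_cast Int.lt_add_one_iff.mp (by exact_mod_cast h1)
      unfold evenAltLoop
      have hg : -(PySem.Int.floordiv (-(b * ((k' : Int) + 1) + e)) ((k' : Int) + 1)) = b + 1 := by
        rw [PySem.Int.neg_floordiv_neg_eq_iff_of_pos (by positivity)]
        constructor <;> nlinarith
      push_cast
      simp only [hg]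
      have hr : b * ((k' : Int) + 1) + e - (b + 1) = b * (k' : Int) + (e - 1) := by ring
      rw [hr, ih b (e - 1) (by omega) (by omega)]
      have h1' : e.toNat = (e - 1).toNat + 1 := by omega
      rw [h1', List.replicate_succ, Nat.add_sub_add_right]
      rfl

-- ===== VERDICT (by name: the statement is the Claim_ definition above) =====
theorem even_distribute_resources_spec : Claim_equal_even_distribute_resources := by
  intro M N _ hpre
  obtain ⟨hN, hM⟩ := hpre
  unfold Spec_even_distribute_resources even_distribute_resources_alt
  rw [evenA_eq_replicate M N hN]
  set base := PySem.Int.floordiv M N with hbase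
  set extra := PySem.Int.mod M N with hextra
  have hNe : N ≠ 0 := by omega
  have hex : 0 ≤ extra ∧ extra < N := by
    rw [hextra, PySem.Int.mod_eq_emod_of_pos hN]
    exact ⟨Int.emod_nonneg M hNe, Int.emod_lt_of_pos M hN⟩
  have hM' : M = base * (N.toNat : Int) + extra := by
    have := PySem.Int.floordiv_mul_add_mod M N
    rw [← hbase, ← hextra] at this
    rw [Int.toNat_of_nonneg (le_of_lt hN)]; linarith
  rw [hM', evenAltLoop_main N.toNat base extra hex.1
    (by rw [Int.toNat_of_nonneg (le_of_lt hN)] at *; exact hex.2)]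
  congr 1
  · congr 1; omega
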